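-- pv_equiv track=rewrite | github.com/damonge/S8z | Cls_david_metacal/to_sacc.py | pol_pair_iterator
-- ===== SOURCE A (Python) =====
-- def pol_pair_iterator(b1, b2):
--     # Iterates over E/B pair combinations
--     for p1 in range(2):
--         if b1 == b2:
--             p2_range = range(p1, 2)
--         else:
--             p2_range = range(2)
--         for p2 in p2_range:
--             ipx = p2 + 2 * p1
--             yield p1, p2, ipx
-- ===== SOURCE B (Python) =====
-- # Loop-free: the function has only two possible output sequences, so select a
-- # precomputed table instead of enumerating with loops.
-- _ALL_PAIRS = [(0, 0, 0), (0, 1, 1), (1, 0, 2), (1, 1, 3)]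
-- _DIAG_PAIRS = [(0, 0, 0), (0, 1, 1), (1, 1, 3)]
--
-- def pol_pair_iterator(b1, b2):
--     yield from (_DIAG_PAIRS if b1 == b2 else _ALL_PAIRS)
-- ===== Notes on version B (the rewrite author's own statement) =====
-- stated objective: simpler
-- what changed: Removes the nested loops entirely: the output is one of exactly two constant sequences (diagonal b1==b2 drops the (1,0,2) pair), so B yields from a precomputed lookup table selected by b1 == b2.
import Mathlib
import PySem

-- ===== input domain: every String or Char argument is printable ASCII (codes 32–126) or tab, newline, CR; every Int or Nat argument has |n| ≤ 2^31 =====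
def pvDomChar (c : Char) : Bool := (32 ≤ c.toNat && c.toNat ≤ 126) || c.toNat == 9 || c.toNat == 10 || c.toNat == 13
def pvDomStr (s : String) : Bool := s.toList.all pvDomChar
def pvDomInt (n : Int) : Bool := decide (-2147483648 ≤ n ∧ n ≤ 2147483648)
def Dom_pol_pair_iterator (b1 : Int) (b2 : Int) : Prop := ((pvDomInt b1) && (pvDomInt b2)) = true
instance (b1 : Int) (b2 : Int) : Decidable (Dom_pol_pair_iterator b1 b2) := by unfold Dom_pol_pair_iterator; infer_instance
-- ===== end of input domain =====

-- B removes the loops: it selects one of two precomputed constant pair tables by whether b1 == b2 (simpler, table-based).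


-- ===== PORT A =====
def pol_pair_iterator (b1 : Int) (b2 : Int) : List (Int × Int × Int) :=
  (PySem.List.pyRange 0 2 1).foldl (fun acc p1 =>
    let p2_range := if b1 = b2 then PySem.List.pyRange p1 2 1 else PySem.List.pyRange 0 2 1
    p2_range.foldl (fun acc2 p2 =>
      let ipx := p2 + 2 * p1
      acc2 ++ [(p1, p2, ipx)]) acc) []

-- ===== PORT B =====
def pvAllPairs : List (Int × Int × Int) := [(0, 0, 0), (0, 1, 1), (1, 0, 2), (1, 1, 3)]
def pvDiagPairs : List (Int × Int × Int) := [(0, 0, 0), (0, 1, 1), (1, 1, 3)]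

def pol_pair_iterator_alt (b1 : Int) (b2 : Int) : List (Int × Int × Int) :=
  if b1 = b2 then pvDiagPairs else pvAllPairs

-- ===== PRECONDITION & SPEC =====
def Spec_pol_pair_iterator (b1 : Int) (b2 : Int) (out : List (Int × Int × Int)) : Prop := out = pol_pair_iterator_alt b1 b2
instance (b1 : Int) (b2 : Int) (out : List (Int × Int × Int)) : Decidable (Spec_pol_pair_iterator b1 b2 out) := by unfold Spec_pol_pair_iterator; infer_instance

-- ===== CLAIM =====
def Claim_equal_pol_pair_iterator : Prop := ∀ (b1 : Int) (b2 : Int), Dom_pol_pair_iterator b1 b2 → Spec_pol_pair_iterator b1 b2 (pol_pair_iterator b1 b2)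

-- ===== LEMMAS AND PROOFS =====

-- ===== VERDICT =====
theorem pol_pair_iterator_spec : Claim_equal_pol_pair_iterator := by
  intro b1 b2 _
  unfold Spec_pol_pair_iterator pol_pair_iterator pol_pair_iterator_alt pvDiagPairs pvAllPairs
  by_cases h : b1 = b2 <;> simp only [h, if_true, if_false] <;> decide
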